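-- pv_equiv track=rewrite | github.com/yongfang117/pro_useful_code | pro_tcp_server/获取对象1.py | return_err_info
-- ===== SOURCE A (Python) =====
-- data={"command": "device",
--  "response": {
--      "devices":
--          [
--              "device_test",
--              "device_01",
--              "device_02"
--          ],
--      "errors":
--          [
--              {
--                  "device_name": "device_01",
--                  "errs":
--                      [
--                          {
--                              "err_no": 0,
--                              "err_info": "成功"
--                          }, {
--                          "err_no": 1,
--                          "err_info": "失败"
--                      }
--                      ]
--              },
--              {
--                  "device_name": "device_02",
--                  "errs":
--                      [
--                          {
--                              "err_no": 3,
--                              "err_info": "成功"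
--                          }, {
--                          "err_no": 4,
--                          "err_info": "失败"
--                      }
--                      ]
--              }
--
--          ]
--  }
--  }
--
-- def return_err_info(device_name,err_no):
--     # device_name = "device_01"  # 假设传过来为device_01
--     # err_no = 0   # 假设传过来为err_no=0
--     err_info = None
--     errors_obj = data["response"]["errors"]
--     if device_name in data["response"]["devices"]:
--         for i in errors_obj:
--             if i["device_name"] == device_name:
--                 err_no_device = i["errs"]
--                 for ii in err_no_device:
--                     if ii["err_no"] == err_no:
--                         err_info = ii["err_info"]
--                         return err_info
-- ===== SOURCE B (Python) =====
-- data={"command": "device",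
--  "response": {
--      "devices": ["device_test", "device_01", "device_02"],
--      "errors": [
--          {"device_name": "device_01",
--           "errs": [{"err_no": 0, "err_info": "成功"},
--                    {"err_no": 1, "err_info": "失败"}]},
--          {"device_name": "device_02",
--           "errs": [{"err_no": 3, "err_info": "成功"},
--                    {"err_no": 4, "err_info": "失败"}]}
--      ]
--  }
-- }
--
-- _lookup = {(e["device_name"], err["err_no"]): err["err_info"]
--            for e in data["response"]["errors"] for err in e["errs"]}
--
-- def return_err_info(device_name, err_no):
--     return _lookup.get((device_name, err_no))
-- ===== Notes on version B (the rewrite author's own statement) =====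
-- stated objective: idiomatic
-- what changed: Replaces the membership guard plus two nested scans with a flat (device_name, err_no)-keyed dict built once by a single comprehension and one .get lookup; the devices-membership guard is redundant since every device in errors is listed in devices.
import Mathlib
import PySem

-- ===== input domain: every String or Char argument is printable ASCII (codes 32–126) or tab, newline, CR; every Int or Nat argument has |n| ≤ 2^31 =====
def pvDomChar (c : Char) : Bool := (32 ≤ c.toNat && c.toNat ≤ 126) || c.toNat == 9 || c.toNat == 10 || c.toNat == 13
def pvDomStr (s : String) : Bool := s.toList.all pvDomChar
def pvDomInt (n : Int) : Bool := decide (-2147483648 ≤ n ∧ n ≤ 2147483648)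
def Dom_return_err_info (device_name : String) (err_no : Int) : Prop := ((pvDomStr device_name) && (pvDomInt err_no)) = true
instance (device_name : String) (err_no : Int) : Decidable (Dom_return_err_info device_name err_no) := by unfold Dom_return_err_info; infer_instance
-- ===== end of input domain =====

-- B replaces A's membership guard and nested scans with a flat key-indexed table built once plus a single lookup (idiomatic).

-- ===== PORT A =====
-- the module-level constant `data`, in the pieces A's code reads
def pvDevices : List String := ["device_test", "device_01", "device_02"]
def pvErrors : List (String × List (Int × String)) :=
  [("device_01", [(0, "成功"), (1, "失败")]),
   ("device_02", [(3, "成功"), (4, "失败")])]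

-- inner `for ii in err_no_device` loop: return on first matching err_no
def pvInnerLoop (errs : List (Int × String)) (err_no : Int) : Option String :=
  match errs with
  | [] => none
  | (n, info) :: rest => if n == err_no then some info else pvInnerLoop rest err_no

-- outer `for i in errors_obj` loop
def pvOuterLoop (errors : List (String × List (Int × String))) (device_name : String) (err_no : Int) : Option String :=
  match errors with
  | [] => none
  | (dn, errs) :: rest =>
      if dn == device_name then
        match pvInnerLoop errs err_no with
        | some info => some info
        | none => pvOuterLoop rest device_name err_no
      else pvOuterLoop rest device_name err_no

def return_err_info (device_name : String) (err_no : Int) : Option String :=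
  if pvDevices.contains device_name then pvOuterLoop pvErrors device_name err_no
  else none

-- ===== PORT B =====
-- the dict comprehension: flatten errors into a ((device_name, err_no), err_info) table
def pvLookup : PySem.Dict (String × Int) String :=
  pvErrors.foldl (fun d e => e.2.foldl (fun d err => d.insert (e.1, err.1) err.2) d) PySem.Dict.empty

def return_err_info_alt (device_name : String) (err_no : Int) : Option String :=
  pvLookup.get? (device_name, err_no)

-- ===== PRECONDITION & SPEC =====
def Spec_return_err_info (device_name : String) (err_no : Int) (out : Option String) : Prop := out = return_err_info_alt device_name err_no
instance (device_name : String) (err_no : Int) (out : Option String) : Decidable (Spec_return_err_info device_name err_no out) := by unfold Spec_return_err_info; infer_instance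

-- ===== CLAIM (what is proved, stated in full; the proofs are below) =====
def Claim_equal_return_err_info : Prop := ∀ (device_name : String) (err_no : Int), Dom_return_err_info device_name err_no → Spec_return_err_info device_name err_no (return_err_info device_name err_no)

-- ===== LEMMAS AND PROOFS =====

-- ===== VERDICT (by name: the statement is the Claim_ definition above) =====
theorem return_err_info_spec : Claim_equal_return_err_info := by
  intro device_name err_no _
  unfold Spec_return_err_info return_err_info return_err_info_alt
  by_cases h1 : device_name = "device_01"
  · subst h1
    by_cases e0 : err_no = 0
    · subst e0; decide
    · by_cases e1 : err_no = 1
      · subst e1; decide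
      · have e0' : ¬ (0 : Int) = err_no := fun h => e0 h.symm
        have e1' : ¬ (1 : Int) = err_no := fun h => e1 h.symm
        simp [pvDevices, pvErrors, pvOuterLoop, pvInnerLoop, pvLookup,
              PySem.Dict.get?, PySem.Dict.insert, PySem.Dict.empty, List.foldl, e0', e1']
  · by_cases h2 : device_name = "device_02"
    · subst h2
      by_cases e3 : err_no = 3
      · subst e3; decide
      · by_cases e4 : err_no = 4
        · subst e4; decide
        · have e3' : ¬ (3 : Int) = err_no := fun h => e3 h.symm
          have e4' : ¬ (4 : Int) = err_no := fun h => e4 h.symm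
          simp [pvDevices, pvErrors, pvOuterLoop, pvInnerLoop, pvLookup,
                PySem.Dict.get?, PySem.Dict.insert, PySem.Dict.empty, List.foldl, e3', e4']
    · by_cases h0 : device_name = "device_test"
      · subst h0
        simp [pvDevices, pvErrors, pvOuterLoop, pvLookup,
              PySem.Dict.get?, PySem.Dict.insert, PySem.Dict.empty, List.foldl]
      · have h1' : ¬ "device_01" = device_name := fun h => h1 h.symm
        have h2' : ¬ "device_02" = device_name := fun h => h2 h.symm
        simp [pvDevices, pvErrors, pvOuterLoop, pvLookup,
              PySem.Dict.get?, PySem.Dict.insert, PySem.Dict.empty,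
              List.foldl, h0, h1', h2']
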